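-- pv_equiv track=rewrite | github.com/phillipgoellner/advent_of_code_2021 | day_08/day_8_part_1.py | get_unique_digit_amount
-- ===== SOURCE A (Python) =====
-- from typing import List
-- from functools import reduce
--
-- def parse_input_line(input_line: str) -> List[List[str]]:
--     content = input_line.split(' | ')
--     return [[value for value in c_part.split(' ')] for c_part in content]
--
-- def get_unique_digit_amount(input_lines: str):
--     def count_unique_digits(line: List[List[str]]):
--         line = line[1]
--         instances = 0
--         for element in line:
--             if len(element) == 2:
--                 instances += 1
--             if len(element) == 3:
--                 instances += 1
--             if len(element) == 4:
--                 instances += 1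
--             if len(element) == 7:
--                 instances += 1
--         return instances
--
--     input_lines = input_lines.split('\n')
--     input_lines = [parse_input_line(line) for line in input_lines]
--
--     return reduce(lambda x, y: x + y, map(count_unique_digits, input_lines), 0)
-- ===== SOURCE B (Python) =====
-- def get_unique_digit_amount(input_lines: str):
--     total = 0
--     for line in input_lines.split('\n'):
--         run = 0
--         for ch in line.split(' | ')[1] + ' ':
--             if ch == ' ':
--                 if run in (2, 3, 4, 7):
--                     total += 1
--                 run = 0
--             else:
--                 run += 1
--     return total
-- ===== Notes on version B (the rewrite author's own statement) =====
-- stated objective: alternative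
-- what changed: B never tokenises the output section at all: it streams over the characters of the part after the pipe separator with a run-length counter, adding 1 whenever a run of non-space characters of length 2, 3, 4 or 7 ends, instead of A's parse-into-nested-token-lists, per-token four-if counter and reduce.
import Mathlib
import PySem

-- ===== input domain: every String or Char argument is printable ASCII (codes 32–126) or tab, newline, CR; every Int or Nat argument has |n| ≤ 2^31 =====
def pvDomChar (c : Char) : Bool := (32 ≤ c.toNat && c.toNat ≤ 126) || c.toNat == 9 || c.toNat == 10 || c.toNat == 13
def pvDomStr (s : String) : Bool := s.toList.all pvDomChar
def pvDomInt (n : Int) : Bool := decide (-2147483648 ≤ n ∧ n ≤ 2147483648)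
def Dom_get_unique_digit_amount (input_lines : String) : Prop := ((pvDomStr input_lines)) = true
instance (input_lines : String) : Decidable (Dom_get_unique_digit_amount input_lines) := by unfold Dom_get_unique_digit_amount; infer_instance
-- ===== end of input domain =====

-- B streams over the characters of each line's output section with a run-length counter
-- (count a run of non-space characters when it ends and its length is 2/3/4/7) instead of
-- A's parse-into-token-lists, per-token four-if counter and reduce; same cost, different algorithm.

-- ===== PORT A =====
-- parse_input_line (split never raises: separators are nonempty, so split? is some)
def pvParseLine (input_line : String) : List (List String) :=
  ((PySem.Str.split? input_line " | ").getD []).map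
    (fun c_part => (PySem.Str.split? c_part " ").getD [])

-- count_unique_digits; line[1] is pyGetD, in range under Pre_
def pvCountUnique (line : List (List String)) : Int :=
  (PySem.List.pyGetD line 1 []).foldl
    (fun instances element =>
      let instances := if PySem.Str.len element = 2 then instances + 1 else instances
      let instances := if PySem.Str.len element = 3 then instances + 1 else instances
      let instances := if PySem.Str.len element = 4 then instances + 1 else instances
      if PySem.Str.len element = 7 then instances + 1 else instances) 0

def get_unique_digit_amount (input_lines : String) : Int :=
  let lines := (PySem.Str.split? input_lines "\n").getD []
  let parsed := lines.map pvParseLine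
  (parsed.map pvCountUnique).foldl (fun x y => x + y) 0

-- ===== PORT B =====
-- one line of B's loop body: run-length scan over the chars of line.split(' | ')[1] + ' ';
-- state (total, run); the [1] is pyGetD, in range under Pre_
def pvScanLine (total : Int) (line : String) : Int :=
  let seg := PySem.List.pyGetD ((PySem.Str.split? line " | ").getD []) 1 ""
  ((seg.toList ++ [' ']).foldl
    (fun (st : Int × Int) ch =>
      if ch = ' ' then
        (if st.2 = 2 ∨ st.2 = 3 ∨ st.2 = 4 ∨ st.2 = 7 then st.1 + 1 else st.1, 0)
      else (st.1, st.2 + 1)) (total, 0)).1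

def get_unique_digit_amount_alt (input_lines : String) : Int :=
  ((PySem.Str.split? input_lines "\n").getD []).foldl pvScanLine 0

-- ===== PRECONDITION & SPEC =====
-- Pre_ excludes exactly the inputs where some line lacks the space-pipe-space separator: there the
-- [1] access on the line's split raises IndexError in A (and in B alike).
def Pre_get_unique_digit_amount (input_lines : String) : Prop :=
  ∀ line ∈ (PySem.Str.split? input_lines "\n").getD [],
    2 ≤ ((PySem.Str.split? line " | ").getD []).length
instance (input_lines : String) : Decidable (Pre_get_unique_digit_amount input_lines) := by
  unfold Pre_get_unique_digit_amount; infer_instance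

def pvWitness_get_unique_digit_amount : String := "ab | cd efg\nx | abcd abcdefg"

def Spec_get_unique_digit_amount (input_lines : String) (out : Int) : Prop := out = get_unique_digit_amount_alt input_lines
instance (input_lines : String) (out : Int) : Decidable (Spec_get_unique_digit_amount input_lines out) := by unfold Spec_get_unique_digit_amount; infer_instance

-- ===== CLAIM (what is proved, stated in full; the proofs are below) =====
def Claim_equal_get_unique_digit_amount : Prop := ∀ (input_lines : String), Dom_get_unique_digit_amount input_lines → Pre_get_unique_digit_amount input_lines → Spec_get_unique_digit_amount input_lines (get_unique_digit_amount input_lines)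

-- ===== LEMMAS AND PROOFS =====

-- 0/1 indicator of a unique-segment-count length
def pvIsU (n : Int) : Int := if n = 2 ∨ n = 3 ∨ n = 4 ∨ n = 7 then 1 else 0

-- the tokens of a char list under single-space splitting, as structural recursion
def pvToks : List Char → List (List Char)
  | [] => [[]]
  | c :: r =>
      if c = ' ' then [] :: pvToks r
      else match pvToks r with
           | t :: ts => (c :: t) :: ts
           | [] => [[c]]

theorem pvToks_ne_nil (l : List Char) : pvToks l ≠ [] := by
  cases l with
  | nil => simp [pvToks]
  | cons c r =>
      simp only [pvToks]
      split
      · simp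
      · split <;> simp

-- splitOn.go with single-space separator computes pvToks (fuel-independent once sufficient)
theorem pv_go_eq (f : Nat) (l cur : List Char) (acc : List (List Char)) (h : l.length ≤ f) :
    PySem.Chars.splitOn.go [' '] f l cur acc
      = acc.reverse ++ (match pvToks l with
          | t :: ts => (cur.reverse ++ t) :: ts
          | [] => []) := by
  induction f generalizing l cur acc with
  | zero =>
      have hl : l = [] := by cases l <;> simp_all
      subst hl
      simp [PySem.Chars.splitOn.go, pvToks]
  | succ f ih =>
      cases l with
      | nil => simp [PySem.Chars.splitOn.go, pvToks]
      | cons c rest =>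
          simp only [PySem.Chars.splitOn.go]
          by_cases hc : c = ' '
          · have hp : List.isPrefixOf [' '] (c :: rest) = true := by
              simp [List.isPrefixOf, hc]
            rw [if_pos hp]
            have : List.drop [' '].length (c :: rest) = rest := by simp
            rw [this, ih rest [] (cur.reverse :: acc) (by simpa using Nat.le_of_succ_le_succ h)]
            simp only [pvToks, if_pos hc]
            rcases hr : pvToks rest with _ | ⟨t, ts⟩
            · exact absurd hr (pvToks_ne_nil rest)
            · simp
          · have hp : List.isPrefixOf [' '] (c :: rest) = false := by
              simp [List.isPrefixOf]; exact fun e => hc e.symm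
            rw [if_neg (by simp [hp])]
            rw [ih rest (c :: cur) acc (by simpa using Nat.le_of_succ_le_succ h)]
            simp only [pvToks, if_neg hc]
            rcases hr : pvToks rest with _ | ⟨t, ts⟩
            · exact absurd hr (pvToks_ne_nil rest)
            · simp

theorem pv_splitOn_eq (l : List Char) : PySem.Chars.splitOn l [' '] = pvToks l := by
  unfold PySem.Chars.splitOn
  rw [pv_go_eq _ _ _ _ (Nat.le_succ _)]
  rcases hr : pvToks l with _ | ⟨t, ts⟩
  · exact absurd hr (pvToks_ne_nil l)
  · simp

-- B's inner character scan computes the indicator-sum of pvToks token lengths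
theorem pv_scan_eq (l : List Char) (t r : Int) :
    ((l ++ [' ']).foldl
      (fun (st : Int × Int) ch =>
        if ch = ' ' then
          (if st.2 = 2 ∨ st.2 = 3 ∨ st.2 = 4 ∨ st.2 = 7 then st.1 + 1 else st.1, 0)
        else (st.1, st.2 + 1)) (t, r)).1
      = t + pvIsU (r + ((pvToks l).headI.length : Int))
          + ((pvToks l).tail.map (fun tok => pvIsU (tok.length : Int))).sum := by
  induction l generalizing t r with
  | nil =>
      simp only [List.nil_append, List.foldl_cons, List.foldl_nil, if_pos rfl, pvToks,
        List.headI_cons, List.length_nil, Nat.cast_zero, add_zero, List.tail_cons,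
        List.map_nil, List.sum_nil, add_zero]
      unfold pvIsU
      split_ifs <;> ring
  | cons c rest ih =>
      obtain ⟨t0, ts, hr⟩ : ∃ t0 ts, pvToks rest = t0 :: ts := by
        rcases h : pvToks rest with _ | ⟨t0, ts⟩
        · exact absurd h (pvToks_ne_nil rest)
        · exact ⟨t0, ts, rfl⟩
      by_cases hc : c = ' '
      · subst hc
        rw [List.cons_append, List.foldl_cons, if_pos rfl, ih]
        have h1 : pvToks (' ' :: rest) = [] :: t0 :: ts := by simp [pvToks, hr]
        rw [h1, List.headI_cons, List.tail_cons, List.map_cons, List.sum_cons,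
          hr, List.headI_cons, List.tail_cons]
        simp only [List.length_nil, Nat.cast_zero, add_zero, zero_add]
        unfold pvIsU
        split_ifs <;> ring
      · rw [List.cons_append, List.foldl_cons, if_neg hc, ih]
        have h1 : pvToks (c :: rest) = (c :: t0) :: ts := by simp [pvToks, hc, hr]
        rw [h1, List.headI_cons, List.tail_cons, hr, List.headI_cons, List.tail_cons,
          List.length_cons]
        have hlen : r + ((t0.length + 1 : Nat) : Int) = r + 1 + (t0.length : Int) := by
          push_cast; ring
        rw [hlen]

-- A's per-line counter equals the indicator-sum over its token list
theorem pv_countUnique_eq (line : List (List String)) :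
    pvCountUnique line
      = ((PySem.List.pyGetD line 1 []).map (fun e => pvIsU (PySem.Str.len e))).sum := by
  unfold pvCountUnique
  generalize PySem.List.pyGetD line 1 [] = xs
  suffices h : ∀ (a : Int), (xs.foldl (fun instances element =>
      let instances := if PySem.Str.len element = 2 then instances + 1 else instances
      let instances := if PySem.Str.len element = 3 then instances + 1 else instances
      let instances := if PySem.Str.len element = 4 then instances + 1 else instances
      if PySem.Str.len element = 7 then instances + 1 else instances) a)
      = a + (xs.map (fun e => pvIsU (PySem.Str.len e))).sum by
    rw [h 0]; ring
  induction xs with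
  | nil => simp
  | cons e es ih =>
      intro a
      rw [List.foldl_cons, ih]
      simp only [List.map_cons, List.sum_cons]
      unfold pvIsU
      split_ifs <;> omega

-- under Pre_, A's line[1]-of-parsed is the space-split of B's segment, as strings
theorem pv_parsed_one (line : String)
    (h : 2 ≤ ((PySem.Str.split? line " | ").getD []).length) :
    PySem.List.pyGetD (pvParseLine line) 1 []
      = (PySem.Str.split?
          (PySem.List.pyGetD ((PySem.Str.split? line " | ").getD []) 1 "") " ").getD [] := by
  unfold pvParseLine
  rw [show ((1 : Int)) = ((1 : Nat) : Int) by norm_num,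
      PySem.List.pyGetD_natCast, PySem.List.pyGetD_natCast]
  generalize hp : (PySem.Str.split? line " | ").getD [] = parts at h ⊢
  rcases parts with _ | ⟨x, _ | ⟨y, rest⟩⟩
  · simp at h
  · simp at h
  · simp

-- the string-level space-split's token lengths are pvToks lengths
theorem pv_split_lens (s : String) :
    ((PySem.Str.split? s " ").getD []).map (fun e => pvIsU (PySem.Str.len e))
      = (pvToks s.toList).map (fun tok => pvIsU (tok.length : Int)) := by
  have hmap := PySem.Str.split?_map s " "
  rcases hq : PySem.Str.split? s " " with _ | ⟨lst⟩
  · rw [hq] at hmap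
    simp [PySem.Chars.split?] at hmap
  · rw [hq] at hmap
    simp only [Option.map_some] at hmap
    have : PySem.Chars.split? s.toList " ".toList = some (PySem.Chars.splitOn s.toList [' ']) := by
      simp [PySem.Chars.split?]
    rw [this] at hmap
    have hl : lst.map String.toList = pvToks s.toList := by
      rw [← pv_splitOn_eq]
      exact Option.some.inj hmap
    rw [Option.getD_some, ← hl, List.map_map]
    apply List.map_congr_left
    intro e _
    simp [PySem.Str.len_eq, Function.comp]

-- per line, under Pre_: B's scan step adds exactly A's per-line count
theorem pv_line_eq (line : String) (total : Int)
    (h : 2 ≤ ((PySem.Str.split? line " | ").getD []).length) :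
    pvScanLine total line = total + pvCountUnique (pvParseLine line) := by
  unfold pvScanLine
  rw [pv_scan_eq, pv_countUnique_eq, pv_parsed_one line h, pv_split_lens]
  rcases hr : pvToks (PySem.List.pyGetD ((PySem.Str.split? line " | ").getD []) 1 "").toList
    with _ | ⟨t0, ts⟩
  · exact absurd hr (pvToks_ne_nil _)
  · simp only [List.headI, List.tail_cons, List.map_cons, List.sum_cons]
    ring_nf

-- the two outer folds agree, line by line
theorem pv_fold_eq (ls : List String) (s : Int)
    (h : ∀ line ∈ ls, 2 ≤ ((PySem.Str.split? line " | ").getD []).length) :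
    ls.foldl pvScanLine s
      = ((ls.map pvParseLine).map pvCountUnique).foldl (fun x y => x + y) s := by
  induction ls generalizing s with
  | nil => simp
  | cons l ls ih =>
      simp only [List.map_cons, List.foldl_cons]
      rw [pv_line_eq l s (h l List.mem_cons_self)]
      exact ih _ (fun x hx => h x (List.mem_cons_of_mem _ hx))

-- ===== VERDICT (by name: the statement is the Claim_ definition above) =====
theorem get_unique_digit_amount_spec : Claim_equal_get_unique_digit_amount := by
  intro input_lines _ hpre
  show get_unique_digit_amount input_lines = get_unique_digit_amount_alt input_lines
  simp only [get_unique_digit_amount, get_unique_digit_amount_alt]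
  rw [pv_fold_eq _ _ hpre]
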